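-- pv_equiv track=rewrite | github.com/CDBiddulph/scaffold-learning | experiments/keep_crosswords_20250711_195402/scaffolds/8-2-0-2/scaffold.py | number_grid
-- ===== SOURCE A (Python) =====
-- def number_grid(grid):
--     """Number the grid squares according to crossword rules"""
--     height = len(grid)
--     width = len(grid[0]) if height > 0 else 0
--
--     clue_positions = {}
--     current_num = 1
--
--     for row in range(height):
--         for col in range(width):
--             if grid[row][col] == ".":
--                 continue
--
--             starts_across = (
--                 (col == 0 or grid[row][col - 1] == ".")
--                 and col + 1 < width
--                 and grid[row][col + 1] != "."
--             )
--             starts_down = (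
--                 (row == 0 or grid[row - 1][col] == ".")
--                 and row + 1 < height
--                 and grid[row + 1][col] != "."
--             )
--
--             if starts_across or starts_down:
--                 clue_positions[current_num] = (row, col)
--                 current_num += 1
--
--     return clue_positions
-- ===== SOURCE B (Python) =====
-- def number_grid(grid):
--     """Number the grid squares according to crossword rules.
--
--     Different decomposition: first collect all word-start positions with two
--     separate sweeps (a row-major sweep for across starts, a column-major sweep
--     for down starts) into a set, then assign sequential numbers in one
--     row-major reading-order pass over that set.
--     """
--     height = len(grid)
--     width = len(grid[0]) if height > 0 else 0
--
--     starts = set()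
--     # across starts: scan each row left to right
--     for row in range(height):
--         for col in range(width):
--             if (grid[row][col] != "."
--                     and (col == 0 or grid[row][col - 1] == ".")
--                     and col + 1 < width and grid[row][col + 1] != "."):
--                 starts.add((row, col))
--     # down starts: scan each column top to bottom
--     for col in range(width):
--         for row in range(height):
--             if (grid[row][col] != "."
--                     and (row == 0 or grid[row - 1][col] == ".")
--                     and row + 1 < height and grid[row + 1][col] != "."):
--                 starts.add((row, col))
--
--     result = {}
--     num = 1
--     for row in range(height):
--         for col in range(width):
--             if (row, col) in starts:
--                 result[num] = (row, col)
--                 num += 1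
--     return result
-- ===== Notes on version B (the rewrite author's own statement) =====
-- stated objective: alternative
-- what changed: Instead of deciding across/down-start inline while numbering, B first collects all word-start positions in two separate sweeps (row-major for across starts, column-major for down starts) into a set, then numbers the set's cells in one row-major reading-order pass.
import Mathlib
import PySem

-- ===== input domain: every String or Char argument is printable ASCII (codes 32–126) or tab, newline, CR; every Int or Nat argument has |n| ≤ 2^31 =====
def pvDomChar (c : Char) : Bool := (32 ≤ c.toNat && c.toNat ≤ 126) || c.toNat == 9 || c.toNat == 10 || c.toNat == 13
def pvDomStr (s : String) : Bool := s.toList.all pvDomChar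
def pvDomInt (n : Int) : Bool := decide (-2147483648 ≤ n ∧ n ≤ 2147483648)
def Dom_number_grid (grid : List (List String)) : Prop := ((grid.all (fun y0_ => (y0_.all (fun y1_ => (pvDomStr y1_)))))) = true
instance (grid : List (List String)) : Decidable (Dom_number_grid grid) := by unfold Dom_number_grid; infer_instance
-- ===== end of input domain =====

-- B collects all word-start positions with two separate sweeps (row-major for across,
-- column-major for down) into a set, then numbers them in one reading-order pass;
-- A decides the start conditions inline while numbering. Objective: alternative decomposition.

-- ===== PORT A =====
-- grid[row][col]; total stand-in (Pre_ guarantees every access A performs is in range)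
def cellA (grid : List (List String)) (r c : Nat) : String :=
  (grid.getD r []).getD c ""

def number_grid (grid : List (List String)) : List (Int × Int × Int) :=
  let height := grid.length
  let width := if height > 0 then (grid.getD 0 []).length else 0
  ((List.range height).foldl (fun st row =>
    (List.range width).foldl (fun st col =>
      if cellA grid row col = "." then st
      else
        if ((col = 0 ∨ cellA grid row (col - 1) = ".")
              ∧ col + 1 < width ∧ cellA grid row (col + 1) ≠ ".")
           ∨ ((row = 0 ∨ cellA grid (row - 1) col = ".")
              ∧ row + 1 < height ∧ cellA grid (row + 1) col ≠ ".")
        then (st.1 ++ [((st.2 : Int), (row : Int), (col : Int))], st.2 + 1)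
        else st) st)
    (([], 1) : List (Int × Int × Int) × Int)).1

-- ===== PORT B =====
def cellB (grid : List (List String)) (r c : Nat) : String :=
  (grid.getD r []).getD c ""

-- row-major sweep: across starts
def acrossStarts (grid : List (List String)) (height width : Nat) : List (Nat × Nat) :=
  (List.range height).flatMap fun row =>
    (List.range width).filterMap fun col =>
      if cellB grid row col ≠ "." ∧ (col = 0 ∨ cellB grid row (col - 1) = ".")
           ∧ col + 1 < width ∧ cellB grid row (col + 1) ≠ "."
      then some (row, col) else none

-- column-major sweep: down starts
def downStarts (grid : List (List String)) (height width : Nat) : List (Nat × Nat) :=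
  (List.range width).flatMap fun col =>
    (List.range height).filterMap fun row =>
      if cellB grid row col ≠ "." ∧ (row = 0 ∨ cellB grid (row - 1) col = ".")
           ∧ row + 1 < height ∧ cellB grid (row + 1) col ≠ "."
      then some (row, col) else none

def number_grid_alt (grid : List (List String)) : List (Int × Int × Int) :=
  let height := grid.length
  let width := if height > 0 then (grid.getD 0 []).length else 0
  let starts : PySem.Set (Nat × Nat) :=
    PySem.Set.ofList (acrossStarts grid height width ++ downStarts grid height width)
  ((List.range height).foldl (fun st row =>
    (List.range width).foldl (fun st col =>
      if (row, col) ∈ starts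
      then (st.1 ++ [((st.2 : Int), (row : Int), (col : Int))], st.2 + 1)
      else st) st)
    (([], 1) : List (Int × Int × Int) × Int)).1

-- ===== PRECONDITION & SPEC =====
-- Pre_ excludes exactly the ragged grids with some row shorter than the first row,
-- on which Python A raises IndexError (every cell up to width-1 of every row is read).
def Pre_number_grid (grid : List (List String)) : Prop :=
  ∀ r ∈ grid, (grid.getD 0 []).length ≤ r.length
instance (grid : List (List String)) : Decidable (Pre_number_grid grid) := by
  unfold Pre_number_grid; infer_instance

def pvWitness_number_grid : List (List String) :=
  [["a", "b", "."], [".", "c", "d"], ["e", "f", "g"]]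

def Spec_number_grid (grid : List (List String)) (out : List (Int × Int × Int)) : Prop :=
  out = number_grid_alt grid
instance (grid : List (List String)) (out : List (Int × Int × Int)) :
    Decidable (Spec_number_grid grid out) := by unfold Spec_number_grid; infer_instance

-- ===== CLAIM (what is proved, stated in full; the proofs are below) =====
def Claim_equal_number_grid : Prop :=
  ∀ (grid : List (List String)), Dom_number_grid grid → Pre_number_grid grid →
    Spec_number_grid grid (number_grid grid)

-- ===== LEMMAS AND PROOFS =====

-- membership in the union of the two sweep lists ↔ the inline condition of A
theorem mem_starts_iff (grid : List (List String)) (height width : Nat) (row col : Nat)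
    (hr : row < height) (hc : col < width) :
    ((row, col) ∈ PySem.Set.ofList (acrossStarts grid height width ++ downStarts grid height width))
    ↔ (cellB grid row col ≠ "." ∧
        (((col = 0 ∨ cellB grid row (col - 1) = ".")
            ∧ col + 1 < width ∧ cellB grid row (col + 1) ≠ ".")
         ∨ ((row = 0 ∨ cellB grid (row - 1) col = ".")
            ∧ row + 1 < height ∧ cellB grid (row + 1) col ≠ "."))) := by
  rw [PySem.Set.mem_ofList, List.mem_append]
  unfold acrossStarts downStarts
  simp only [List.mem_flatMap, List.mem_filterMap, List.mem_range]
  constructor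
  · rintro (⟨r, hr', c, hc', h⟩ | ⟨c, hc', r, hr', h⟩) <;>
      (split at h <;> simp_all)
  · rintro ⟨hopen, hacross | hdown⟩
    · exact Or.inl ⟨row, hr, col, hc, by simp [hopen, hacross]⟩
    · exact Or.inr ⟨col, hc, row, hr, by simp [hopen, hdown]⟩

theorem number_grid_eq_alt (grid : List (List String)) :
    number_grid grid = number_grid_alt grid := by
  unfold number_grid number_grid_alt
  simp only []
  congr 1
  apply PySem.List.foldl_congr_mem
  intro st row hrow
  apply PySem.List.foldl_congr_mem
  intro st' col hcol
  rw [List.mem_range] at hrow hcol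
  have hm := mem_starts_iff grid grid.length
    (if grid.length > 0 then (grid.getD 0 []).length else 0) row col hrow hcol
  by_cases hmem : (row, col) ∈ PySem.Set.ofList
      (acrossStarts grid grid.length (if grid.length > 0 then (grid.getD 0 []).length else 0) ++
       downStarts grid grid.length (if grid.length > 0 then (grid.getD 0 []).length else 0))
  · obtain ⟨hopen, hcond⟩ := hm.mp hmem
    rw [if_pos hmem, if_neg (by simpa [cellA, cellB] using hopen),
        if_pos (by simpa [cellA, cellB] using hcond)]
  · rw [if_neg hmem]
    by_cases hdot : cellA grid row col = "."
    · rw [if_pos hdot]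
    · rw [if_neg hdot, if_neg]
      intro hcond
      exact hmem (hm.mpr ⟨by simpa [cellA, cellB] using hdot, by simpa [cellA, cellB] using hcond⟩)

-- ===== VERDICT (by name: the statement is the Claim_ definition above) =====
theorem number_grid_spec : Claim_equal_number_grid := by
  intro grid _ _
  unfold Spec_number_grid
  exact number_grid_eq_alt grid
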